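-- pv_equiv track=rewrite | github.com/talavis/aoc2020 | 17.py | part2
-- ===== SOURCE A (Python) =====
-- import itertools
--
-- def part2(data):
--     def find_neighbours(a, b, c, d):
--         return [(a+v[0], b+v[1], c+v[2], d+v[3]) for v in itertools.product((-1,0,1), repeat=4) if v != (0, 0, 0, 0)]
--
--     def step(coords):
--         new_coords = set()
--         for coord in coords:
--             neighbours = find_neighbours(*coord)
--             active = sum(1 for entry in neighbours if entry in coords)
--             if 2 <= active <= 3:
--                 new_coords.add(coord)
--             for entry in neighbours:
--                 if entry in coords:
--                     continue
--                 neighs = find_neighbours(*entry)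
--                 active = sum(1 for pos in neighs if pos in coords)
--                 if active == 3:
--                     new_coords.add(entry)
--         return new_coords
--
--     # changes may only occur next to an existing '#'
--     coords = set()
--     for i in range(len(data)):
--         for j in range(len(data[0])):
--             if data[i][j] == '#':
--                 coords.add((0, 0, i, j))
--
--     for i in range(6):
--         coords = step(coords)
--
--     return len(coords)
-- ===== SOURCE B (Python) =====
-- import itertools
--
--
-- def part2(data):
--     offs = [off for off in itertools.product(range(-1, 2), repeat=4) if any(off)]
--
--     def neighbours(cell):
--         a, b, c, d = cell
--         return [(a + da, b + db, c + dc, d + dd) for (da, db, dc, dd) in offs]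
--
--     def evolve(cells, n):
--         # one pass: count every neighbour occurrence, then apply the rules to the counter
--         if n == 0:
--             return len(cells)
--         counts = {}
--         for nb in (nb for cell in cells for nb in neighbours(cell)):
--             counts[nb] = counts.get(nb, 0) + 1
--         return evolve({c for c, k in counts.items()
--                        if k == 3 or (k == 2 and c in cells)}, n - 1)
--
--     width = len(data[0]) if data else 0
--     return evolve({(0, 0, i, j)
--                    for i, row in enumerate(data)
--                    for j, ch in enumerate(row[:width]) if ch == '#'}, 6)
-- ===== Notes on version B (the rewrite author's own statement) =====
-- stated objective: alternative
-- what changed: Instead of re-scanning the 80-cell neighbourhood of every active cell and of every inactive neighbour against the whole set, B recursively evolves the board: each step makes one pass over the active cells incrementing a neighbour counter and then applies the birth/survival rules to the counter's entries; the board is read via enumerate rather than index loops.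
import Mathlib
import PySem

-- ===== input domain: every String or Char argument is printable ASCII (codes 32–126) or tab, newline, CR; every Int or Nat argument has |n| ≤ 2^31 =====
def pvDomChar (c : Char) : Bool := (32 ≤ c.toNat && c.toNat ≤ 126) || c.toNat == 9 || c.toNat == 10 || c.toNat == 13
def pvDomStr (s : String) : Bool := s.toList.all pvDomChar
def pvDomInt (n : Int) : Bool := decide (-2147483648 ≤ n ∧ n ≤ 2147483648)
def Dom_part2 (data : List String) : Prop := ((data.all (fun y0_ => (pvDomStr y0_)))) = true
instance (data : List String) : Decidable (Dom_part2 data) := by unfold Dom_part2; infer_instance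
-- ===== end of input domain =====

-- B recursively evolves the board, each step making one pass over the active cells into a
-- neighbour counter before applying the rules, instead of A's per-cell neighbourhood re-scans
-- (objective: alternative).

-- a 4D cell
abbrev Pt : Type := Int × Int × Int × Int

-- ===== PORT A =====
-- data[i][j] (A reads the board by integer indices; none = IndexError, excluded by Pre_)
def pyCharAt (data : List String) (i j : Int) : Option Char :=
  match PySem.List.pyGet? data i with
  | none => none
  | some s => PySem.Str.pyGet? s j

-- [v for v in itertools.product((-1,0,1), repeat=4) if v != (0,0,0,0)]
def deltasA : List Pt :=
  (((([-1, 0, 1] : List Int).flatMap fun a =>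
     (([-1, 0, 1] : List Int).flatMap fun b =>
      (([-1, 0, 1] : List Int).flatMap fun c =>
       (([-1, 0, 1] : List Int).map fun d => ((a, b, c, d) : Pt)))))).filter
    fun v => v ≠ ((0, 0, 0, 0) : Pt))

def findNeighboursA (p : Pt) : List Pt :=
  deltasA.map fun v => (p.1 + v.1, p.2.1 + v.2.1, p.2.2.1 + v.2.2.1, p.2.2.2 + v.2.2.2)

def stepA (coords : List Pt) : List Pt :=
  coords.foldl (fun new_coords coord =>
    let neighbours := findNeighboursA coord
    let active : Int := (neighbours.map fun entry => if entry ∈ coords then (1 : Int) else 0).sum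
    let new_coords := if 2 ≤ active ∧ active ≤ 3 then PySem.Set.add new_coords coord else new_coords
    neighbours.foldl (fun new_coords entry =>
      if entry ∈ coords then new_coords
      else
        let neighs := findNeighboursA entry
        let active2 : Int := (neighs.map fun pos => if pos ∈ coords then (1 : Int) else 0).sum
        if active2 = 3 then PySem.Set.add new_coords entry else new_coords) new_coords)
    PySem.Set.empty

-- the two initial-board loops of A
def initA (data : List String) : PySem.Set Pt :=
  (PySem.List.pyRange 0 (data.length : Int)).foldl (fun s i =>
    -- len(data[0]): the loop body only runs when data is nonempty, so data[0] is its head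
    (PySem.List.pyRange 0 ((data.headD "").toList.length : Int)).foldl (fun s j =>
      if pyCharAt data i j = some '#' then PySem.Set.add s ((0 : Int), (0 : Int), i, j) else s) s)
    PySem.Set.empty

def part2 (data : List String) : Int :=
  let final := (PySem.List.pyRange 0 6).foldl (fun c _ => stepA c) (initA data)
  (final.length : Int)

-- ===== PORT B =====
-- [off for off in itertools.product(range(-1, 2), repeat=4) if any(off)]
def offsB : List Pt :=
  (((PySem.List.pyRange (-1) 2).flatMap fun da =>
    ((PySem.List.pyRange (-1) 2).flatMap fun db =>
     ((PySem.List.pyRange (-1) 2).flatMap fun dc =>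
      ((PySem.List.pyRange (-1) 2).map fun dd => ((da, db, dc, dd) : Pt))))).filter
    fun off => ¬ (off.1 = 0 ∧ off.2.1 = 0 ∧ off.2.2.1 = 0 ∧ off.2.2.2 = 0))

def neighboursB (cell : Pt) : List Pt :=
  offsB.map fun off => (cell.1 + off.1, cell.2.1 + off.2.1, cell.2.2.1 + off.2.2.1, cell.2.2.2 + off.2.2.2)

-- the counter loop: counts[nb] = counts.get(nb, 0) + 1 over the flattened generator
def countsB (cells : List Pt) : PySem.Dict Pt Int :=
  (cells.flatMap neighboursB).foldl (fun d nb => d.insert nb (d.getD nb 0 + 1)) PySem.Dict.empty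

-- the set comprehension over the counter's items
def surviveB (cells : List Pt) : List Pt :=
  PySem.Set.ofList
    (((countsB cells).items.filter fun p => p.2 = 3 ∨ (p.2 = 2 ∧ p.1 ∈ cells)).map (·.1))

def evolveB (cells : List Pt) : Nat → Int
  | 0 => (cells.length : Int)
  | n + 1 => evolveB (surviveB cells) n

-- the initial-board set comprehension; row[:width] with width = len(data[0]) ≥ 0 is an exact take
def initB (data : List String) : PySem.Set Pt :=
  let width : Nat := if data = [] then 0 else (data.headD "").toList.length
  PySem.Set.ofList
    ((PySem.List.enumerate data 0).flatMap fun ir =>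
      (PySem.List.enumerate (ir.2.toList.take width) 0).filterMap fun jc =>
        if jc.2 = '#' then some (((0 : Int), (0 : Int), ir.1, jc.1) : Pt) else none)

def part2_alt (data : List String) : Int :=
  evolveB (initB data) 6

-- ===== PRECONDITION & SPEC =====
-- Pre_ excludes exactly the inputs on which A raises IndexError: a row shorter than the first row
-- (A reads data[i][j] for every j < len(data[0])).
def Pre_part2 (data : List String) : Prop :=
  ∀ s ∈ data, (data.headD "").toList.length ≤ s.toList.length
instance (data : List String) : Decidable (Pre_part2 data) := by unfold Pre_part2; infer_instance

def pvWitness_part2 : List String := [".#.", "..#", "###"]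

def Spec_part2 (data : List String) (out : Int) : Prop := out = part2_alt data
instance (data : List String) (out : Int) : Decidable (Spec_part2 data out) := by unfold Spec_part2; infer_instance

-- ===== CLAIM (what is proved, stated in full; the proofs are below) =====
def Claim_equal_part2 : Prop := ∀ (data : List String), Dom_part2 data → Pre_part2 data → Spec_part2 data (part2 data)

-- ===== LEMMAS AND PROOFS =====

-- generic: membership through a foldl whose step adds elements described by P
theorem mem_foldl_of_step {α β : Type} (f : List α → β → List α) (P : β → α → Prop)
    (hf : ∀ s b y, y ∈ f s b ↔ y ∈ s ∨ P b y) :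
    ∀ (l : List β) (s : List α) (y : α), y ∈ l.foldl f s ↔ y ∈ s ∨ ∃ b ∈ l, P b y := by
  intro l
  induction l with
  | nil => simp
  | cons b l ih =>
    intro s y
    simp only [List.foldl_cons, ih, hf, List.mem_cons]
    constructor
    · rintro ((h | h) | ⟨c, hc, hP⟩)
      · exact Or.inl h
      · exact Or.inr ⟨b, Or.inl rfl, h⟩
      · exact Or.inr ⟨c, Or.inr hc, hP⟩
    · rintro (h | ⟨c, (rfl | hc), hP⟩)
      · exact Or.inl (Or.inl h)
      · exact Or.inl (Or.inr hP)
      · exact Or.inr ⟨c, hc, hP⟩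

-- generic: Nodup through a foldl whose step preserves it
theorem nodup_foldl_of_step {α β : Type} (f : List α → β → List α)
    (hf : ∀ s b, s.Nodup → (f s b).Nodup) :
    ∀ (l : List β) (s : List α), s.Nodup → (l.foldl f s).Nodup := by
  intro l
  induction l with
  | nil => intro s hs; simpa using hs
  | cons b l ih => intro s hs; exact ih _ (hf _ _ hs)

theorem offsB_eq : offsB = deltasA := by decide

theorem deltasA_nodup : deltasA.Nodup := by decide

theorem deltasA_neg : ∀ v ∈ deltasA, ((-v.1, -v.2.1, -v.2.2.1, -v.2.2.2) : Pt) ∈ deltasA := by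
  decide

theorem nodup_findNeighboursA (p : Pt) : (findNeighboursA p).Nodup := by
  refine List.Nodup.map ?_ deltasA_nodup
  rintro ⟨a, b, c, d⟩ ⟨a', b', c', d'⟩ h
  simp only [Prod.mk.injEq] at h ⊢
  omega

theorem neighboursB_eq : neighboursB = findNeighboursA := by
  funext p
  rw [neighboursB, findNeighboursA, offsB_eq]

theorem mem_findNeighboursA_symm {p q : Pt} :
    q ∈ findNeighboursA p ↔ p ∈ findNeighboursA q := by
  have key : ∀ p q : Pt, q ∈ findNeighboursA p → p ∈ findNeighboursA q := by
    rintro ⟨p1, p2, p3, p4⟩ ⟨q1, q2, q3, q4⟩ h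
    simp only [findNeighboursA, List.mem_map] at h ⊢
    obtain ⟨⟨a, b, c, d⟩, hv, he⟩ := h
    refine ⟨(-a, -b, -c, -d), deltasA_neg _ hv, ?_⟩
    simp only [Prod.mk.injEq] at he ⊢
    omega
  exact ⟨key p q, key q p⟩

-- the number of active neighbours of x (an Int, as both Python sums/counters produce)
def cnt (coords : List Pt) (x : Pt) : Int :=
  ((findNeighboursA x).countP fun c => decide (c ∈ coords) : Nat)

theorem cnt_congr {s t : List Pt} (h : ∀ x, x ∈ s ↔ x ∈ t) (x : Pt) : cnt s x = cnt t x := by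
  unfold cnt
  congr 1
  exact List.countP_congr fun c _ => by simpa using h c

theorem cnt_pos_elim {coords : List Pt} {x : Pt} (h : 0 < cnt coords x) :
    ∃ c ∈ coords, x ∈ findNeighboursA c := by
  unfold cnt at h
  have h' : 0 < (findNeighboursA x).countP fun c => decide (c ∈ coords) := by exact_mod_cast h
  rw [List.countP_pos_iff] at h'
  obtain ⟨c, hc, hm⟩ := h'
  exact ⟨c, by simpa using hm, mem_findNeighboursA_symm.mp hc⟩

theorem active_eq_cnt (coords : List Pt) (x : Pt) :
    ((findNeighboursA x).map fun e => if e ∈ coords then (1 : Int) else 0).sum = cnt coords x := by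
  unfold cnt
  have := PySem.List.sum_map_ite_one_zero (fun c => decide (c ∈ coords)) (findNeighboursA x)
  simpa using this

-- characterisation of A's step
theorem mem_stepA (coords : List Pt) (x : Pt) :
    x ∈ stepA coords ↔
      (x ∈ coords ∧ 2 ≤ cnt coords x ∧ cnt coords x ≤ 3) ∨
      (x ∉ coords ∧ cnt coords x = 3) := by
  have hinner : ∀ (coord : Pt) (s : List Pt) (y : Pt),
      y ∈ (findNeighboursA coord).foldl (fun new_coords entry =>
        if entry ∈ coords then new_coords
        else
          let neighs := findNeighboursA entry
          let active2 : Int := (neighs.map fun pos => if pos ∈ coords then (1 : Int) else 0).sum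
          if active2 = 3 then PySem.Set.add new_coords entry else new_coords) s ↔
      y ∈ s ∨ (y ∈ findNeighboursA coord ∧ y ∉ coords ∧ cnt coords y = 3) := by
    intro coord s y
    have := mem_foldl_of_step
      (fun new_coords entry =>
        if entry ∈ coords then new_coords
        else
          let neighs := findNeighboursA entry
          let active2 : Int := (neighs.map fun pos => if pos ∈ coords then (1 : Int) else 0).sum
          if active2 = 3 then PySem.Set.add new_coords entry else new_coords)
      (fun entry y => y = entry ∧ entry ∉ coords ∧ cnt coords entry = 3)
      ?_ (findNeighboursA coord) s y
    · rw [this]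
      constructor
      · rintro (h | ⟨e, he, rfl, hne, h3⟩)
        · exact Or.inl h
        · exact Or.inr ⟨he, hne, h3⟩
      · rintro (h | ⟨he, hne, h3⟩)
        · exact Or.inl h
        · exact Or.inr ⟨y, he, rfl, hne, h3⟩
    · intro s e y
      simp only [active_eq_cnt]
      by_cases hmem : e ∈ coords
      · simp [hmem]
      · by_cases h3 : cnt coords e = 3
        · simp [hmem, h3, PySem.Set.mem_add]
        · simp [hmem, h3]
  have houter := mem_foldl_of_step
    (fun new_coords coord =>
      let neighbours := findNeighboursA coord
      let active : Int := (neighbours.map fun entry => if entry ∈ coords then (1 : Int) else 0).sum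
      let new_coords := if 2 ≤ active ∧ active ≤ 3 then PySem.Set.add new_coords coord else new_coords
      neighbours.foldl (fun new_coords entry =>
        if entry ∈ coords then new_coords
        else
          let neighs := findNeighboursA entry
          let active2 : Int := (neighs.map fun pos => if pos ∈ coords then (1 : Int) else 0).sum
          if active2 = 3 then PySem.Set.add new_coords entry else new_coords) new_coords)
    (fun coord y =>
      (y = coord ∧ 2 ≤ cnt coords coord ∧ cnt coords coord ≤ 3) ∨
      (y ∈ findNeighboursA coord ∧ y ∉ coords ∧ cnt coords y = 3))
    ?_ coords PySem.Set.empty x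
  · unfold stepA
    rw [houter]
    simp only [PySem.Set.empty, List.not_mem_nil, false_or]
    constructor
    · rintro ⟨c, hc, (⟨rfl, h2, h3⟩ | ⟨_, hne, h3⟩)⟩
      · exact Or.inl ⟨hc, h2, h3⟩
      · exact Or.inr ⟨hne, h3⟩
    · rintro (⟨hx, h2, h3⟩ | ⟨hne, h3⟩)
      · exact ⟨x, hx, Or.inl ⟨rfl, h2, h3⟩⟩
      · obtain ⟨c, hc, hn⟩ := cnt_pos_elim (coords := coords) (x := x) (by omega)
        exact ⟨c, hc, Or.inr ⟨hn, hne, h3⟩⟩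
  · intro s c y
    simp only
    rw [hinner c _ y]
    simp only [active_eq_cnt]
    by_cases hr : 2 ≤ cnt coords c ∧ cnt coords c ≤ 3
    · simp only [if_pos hr, PySem.Set.mem_add]
      tauto
    · simp only [if_neg hr]
      tauto

theorem nodup_stepA (coords : List Pt) : (stepA coords).Nodup := by
  unfold stepA
  refine nodup_foldl_of_step _ ?_ coords PySem.Set.empty (by simp [PySem.Set.empty])
  intro s c hs
  simp only
  refine nodup_foldl_of_step _ ?_ _ _ ?_
  · intro s' e hs'
    dsimp only
    split
    · exact hs'
    · split
      · exact PySem.Set.nodup_add _ _ hs'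
      · exact hs'
  · split
    · exact PySem.Set.nodup_add _ _ hs
    · exact hs

-- B's counter: its value at x is A's active-neighbour count of x
theorem countsB_getD {cells : List Pt} (hnd : cells.Nodup) (x : Pt) :
    (countsB cells).getD x 0 = cnt cells x := by
  rw [countsB, neighboursB_eq, PySem.Dict.getD_foldl_insert_add_one]
  have hflatcount : ∀ l : List Pt,
      (l.flatMap findNeighboursA).count x = l.countP fun c => decide (x ∈ findNeighboursA c) := by
    intro l
    induction l with
    | nil => simp
    | cons c l ih =>
      rw [List.flatMap_cons, List.count_append, ih, List.countP_cons]
      by_cases hm : x ∈ findNeighboursA c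
      · rw [List.count_eq_one_of_mem (nodup_findNeighboursA c) hm]
        simp [hm]
        omega
      · rw [List.count_eq_zero.mpr hm]
        simp [hm]
  rw [hflatcount]
  have hswap : (cells.countP fun c => decide (x ∈ findNeighboursA c)) =
      (findNeighboursA x).countP fun c => decide (c ∈ cells) := by
    have hsym : (cells.countP fun c => decide (x ∈ findNeighboursA c)) =
        cells.countP fun c => decide (c ∈ findNeighboursA x) :=
      List.countP_congr fun c _ => by
        simp only [decide_eq_true_eq]
        exact ⟨fun h => mem_findNeighboursA_symm.mp h, fun h => mem_findNeighboursA_symm.mp h⟩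
    rw [hsym, List.countP_eq_length_filter, List.countP_eq_length_filter]
    have hperm : (cells.filter fun c => decide (c ∈ findNeighboursA x)).Perm
        ((findNeighboursA x).filter fun c => decide (c ∈ cells)) := by
      rw [List.perm_ext_iff_of_nodup (hnd.filter _) ((nodup_findNeighboursA x).filter _)]
      intro a
      simp only [List.mem_filter, decide_eq_true_eq]
      tauto
    exact hperm.length_eq
  rw [hswap]
  simp [cnt, PySem.Dict.getD_empty]

-- the counter's key set is the set of all neighbours of active cells
theorem countsB_keys (cells : List Pt) :
    (countsB cells).keys = PySem.Set.ofList (cells.flatMap findNeighboursA) := by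
  rw [countsB, neighboursB_eq, PySem.Dict.keys_foldl_insert]
  have : (PySem.Dict.empty : PySem.Dict Pt Int).keys = PySem.Set.empty := rfl
  rw [this, PySem.Set.update_empty]

-- characterisation of B's step
theorem mem_surviveB {cells : List Pt} (hnd : cells.Nodup) (x : Pt) :
    x ∈ surviveB cells ↔
      cnt cells x = 3 ∨ (cnt cells x = 2 ∧ x ∈ cells) := by
  unfold surviveB
  simp only [PySem.Set.mem_ofList, List.mem_map, List.mem_filter]
  have hknd : (countsB cells).keys.Nodup := by
    rw [countsB_keys]; exact PySem.Set.nodup_ofList _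
  have hgetD := countsB_getD hnd x
  constructor
  · rintro ⟨⟨k, n⟩, ⟨hitems, hcond⟩, rfl⟩
    have hg : (countsB cells).get? k = some n :=
      (PySem.Dict.get?_eq_some_iff_mem_items _ _ _ hknd).mpr hitems
    have hkn : (countsB cells).getD k 0 = n := by
      rw [PySem.Dict.getD_eq_get?_getD, hg]; rfl
    rw [hgetD] at hkn
    simp only [decide_eq_true_eq] at hcond
    rcases hcond with h3 | ⟨h2, hm⟩
    · exact Or.inl (hkn.trans h3)
    · exact Or.inr ⟨hkn.trans h2, hm⟩
  · intro h
    have hpos : 0 < cnt cells x := by rcases h with h | ⟨h, _⟩ <;> omega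
    obtain ⟨c, hc, hn⟩ := cnt_pos_elim hpos
    have hxk : x ∈ (countsB cells).keys := by
      rw [countsB_keys, PySem.Set.mem_ofList, List.mem_flatMap]
      exact ⟨c, hc, hn⟩
    have hg : (countsB cells).get? x = some ((countsB cells).getD x 0) := by
      rcases hopt : (countsB cells).get? x with _ | v
      · exact absurd ((PySem.Dict.get?_eq_none_iff_not_mem_keys _ _).mp hopt) (by simpa using hxk)
      · rw [PySem.Dict.getD_eq_get?_getD, hopt]
        rfl
    refine ⟨(x, (countsB cells).getD x 0),
      ⟨(PySem.Dict.get?_eq_some_iff_mem_items _ _ _ hknd).mp hg, ?_⟩, rfl⟩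
    simp only [decide_eq_true_eq]
    rw [hgetD]
    exact h

theorem nodup_surviveB (cells : List Pt) : (surviveB cells).Nodup := by
  unfold surviveB
  exact PySem.Set.nodup_ofList _

-- one step preserves the invariant "same membership, both nodup"
theorem step_equiv {s t : List Pt} (_hs : s.Nodup) (ht : t.Nodup)
    (h : ∀ x, x ∈ s ↔ x ∈ t) : ∀ x, x ∈ stepA s ↔ x ∈ surviveB t := by
  intro x
  rw [mem_stepA, mem_surviveB ht]
  have hc : cnt s x = cnt t x := cnt_congr h x
  rw [hc, h x]
  constructor
  · rintro (⟨hm, h2, h3⟩ | ⟨hm, h3⟩)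
    · have : cnt t x = 2 ∨ cnt t x = 3 := by omega
      rcases this with h' | h'
      · exact Or.inr ⟨h', hm⟩
      · exact Or.inl h'
    · exact Or.inl h3
  · rintro (h3 | ⟨h2, hm⟩)
    · by_cases hm : x ∈ t
      · exact Or.inl ⟨hm, by omega, by omega⟩
      · exact Or.inr ⟨hm, h3⟩
    · exact Or.inl ⟨hm, by omega, by omega⟩

-- the two initial boards have the same membership
theorem init_equiv (data : List String) : ∀ x, x ∈ initA data ↔ x ∈ initB data := by
  intro x
  unfold initA initB
  have hinner : ∀ (i : Int) (s : List Pt) (y : Pt),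
      y ∈ (PySem.List.pyRange 0 ((data.headD "").toList.length : Int)).foldl (fun s j =>
        if pyCharAt data i j = some '#' then PySem.Set.add s ((0 : Int), (0 : Int), i, j) else s) s ↔
      y ∈ s ∨ ∃ j ∈ PySem.List.pyRange 0 ((data.headD "").toList.length : Int),
        y = ((0 : Int), (0 : Int), i, j) ∧ pyCharAt data i j = some '#' := by
    intro i s y
    refine mem_foldl_of_step _
      (fun j y => y = ((0 : Int), (0 : Int), i, j) ∧ pyCharAt data i j = some '#') ?_ _ s y
    intro s' j y'
    by_cases hch : pyCharAt data i j = some '#'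
    · simp [hch, PySem.Set.mem_add]
    · simp [hch]
  rw [mem_foldl_of_step _
    (fun i y => ∃ j ∈ PySem.List.pyRange 0 ((data.headD "").toList.length : Int),
        y = ((0 : Int), (0 : Int), i, j) ∧ pyCharAt data i j = some '#')
    (fun s i y => hinner i s y)]
  rw [PySem.Set.mem_ofList, List.mem_flatMap]
  simp only [PySem.Set.empty, List.not_mem_nil, false_or, List.mem_filterMap]
  constructor
  · rintro ⟨i, hi, j, hj, rfl, hch⟩
    rw [PySem.List.mem_pyRange_one] at hi hj
    have hlen : 0 < data.length := by omega
    have hne : data ≠ [] := List.ne_nil_of_length_pos hlen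
    -- concretise the integer indices as naturals
    obtain ⟨k, rfl⟩ : ∃ k : Nat, i = (k : Int) := ⟨i.toNat, (Int.toNat_of_nonneg hi.1).symm⟩
    obtain ⟨m, rfl⟩ : ∃ m : Nat, j = (m : Int) := ⟨j.toNat, (Int.toNat_of_nonneg hj.1).symm⟩
    have hk : k < data.length := by exact_mod_cast hi.2
    have hm : m < (data.headD "").toList.length := by exact_mod_cast hj.2
    have hrow : pyCharAt data (k : Int) (m : Int) = (data[k].toList)[m]? := by
      simp [pyCharAt, hk]
    rw [hrow] at hch
    have hmr : m < data[k].toList.length := by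
      rcases List.getElem?_eq_some_iff.mp hch with ⟨h', _⟩
      exact h'
    refine ⟨(⟨(k : Int), data[k]⟩ : Int × String), ?_, ?_⟩
    · rw [PySem.List.mem_enumerate_iff]
      exact ⟨k, hk, by simp⟩
    · refine ⟨(⟨(m : Int), data[k].toList[m]⟩ : Int × Char), ?_, ?_⟩
      · rw [PySem.List.mem_enumerate_iff]
        refine ⟨m, ?_, ?_⟩
        · simp only [if_neg hne, List.length_take]
          omega
        · simp only [if_neg hne, List.getElem_take]
          simp
      · have hv : data[k].toList[m] = '#' := by
          have := List.getElem?_eq_some_iff.mp hch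
          rcases this with ⟨h', hv⟩
          exact hv
        simp [hv]
  · rintro ⟨⟨i, row⟩, hir, ⟨j, ch⟩, hjc, hch⟩
    rw [PySem.List.mem_enumerate_iff] at hir
    obtain ⟨k, hk, hpair⟩ := hir
    obtain ⟨rfl, rfl⟩ : i = (k : Int) ∧ row = data[k] := by
      have h1 := congrArg Prod.fst hpair
      have h2 := congrArg Prod.snd hpair
      simp at h1 h2
      exact ⟨by omega, h2⟩
    have hne : data ≠ [] := List.ne_nil_of_length_pos (by omega)
    rw [PySem.List.mem_enumerate_iff] at hjc
    obtain ⟨m, hm, hpair2⟩ := hjc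
    simp only [if_neg hne, List.length_take] at hm
    obtain ⟨rfl, hch'⟩ : j = (m : Int) ∧ ch = (data[k].toList.take ((data.headD "").toList.length))[m]'(by simpa [if_neg hne] using hm) := by
      have h1 := congrArg Prod.fst hpair2
      have h2 := congrArg Prod.snd hpair2
      simp only [if_neg hne] at h1 h2
      constructor
      · simpa using h1
      · simpa using h2
    have hmw : m < (data.headD "").toList.length := by omega
    have hml : m < data[k].toList.length := by omega
    have hval : ch = data[k].toList[m] := by
      rw [hch']
      exact List.getElem_take
    split at hch
    · rename_i hhash
      refine ⟨(k : Int), ?_, (m : Int), ?_, ?_, ?_⟩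
      · rw [PySem.List.mem_pyRange_one]; constructor <;> [positivity; exact_mod_cast hk]
      · rw [PySem.List.mem_pyRange_one]; constructor <;> [positivity; exact_mod_cast hmw]
      · have := Option.some_inj.mp hch
        simp only at this
        exact this.symm
      · have hpc : pyCharAt data (k : Int) (m : Int) = (data[k].toList)[m]? := by
          simp [pyCharAt, hk]
        have hch2 : ch = '#' := by simpa using hhash
        rw [hpc, List.getElem?_eq_getElem hml, ← hval, hch2]
    · exact absurd hch (by simp)

theorem nodup_initA (data : List String) : (initA data).Nodup := by
  unfold initA
  refine nodup_foldl_of_step _ ?_ _ _ (by simp [PySem.Set.empty])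
  intro s i hs
  refine nodup_foldl_of_step _ ?_ _ _ hs
  intro s' j hs'
  split
  · exact PySem.Set.nodup_add _ _ hs'
  · exact hs'

-- the n-fold iteration: A's foldl-driven steps agree with B's recursive evolve
theorem iter_equiv : ∀ (l : List Int) (s t : List Pt), s.Nodup → t.Nodup →
    (∀ x, x ∈ s ↔ x ∈ t) →
    ((l.foldl (fun c _ => stepA c) s).length : Int) = evolveB t l.length := by
  intro l
  induction l with
  | nil =>
    intro s t hs ht h
    simp only [List.foldl_nil, List.length_nil, evolveB]
    exact_mod_cast ((List.perm_ext_iff_of_nodup hs ht).mpr h).length_eq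
  | cons a l ih =>
    intro s t hs ht h
    simp only [List.foldl_cons, List.length_cons, evolveB]
    exact ih _ _ (nodup_stepA s) (nodup_surviveB t) (step_equiv hs ht h)

-- ===== VERDICT (by name: the statement is the Claim_ definition above) =====
theorem part2_spec : Claim_equal_part2 := by
  intro data _hdom _hpre
  unfold Spec_part2 part2 part2_alt
  simp only
  have hlen : (PySem.List.pyRange 0 6).length = 6 := by decide
  rw [← hlen]
  exact iter_equiv (PySem.List.pyRange 0 6) (initA data) (initB data) (nodup_initA data)
    (PySem.Set.nodup_ofList _) (init_equiv data)
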